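-- pv_equiv track=rewrite | github.com/jackarnold84/fantasy-forecaster | metrics/players/reader.py | extract_team_and_pos
-- ===== SOURCE A (Python) =====
-- POSITIONS = ['QB', 'RB', 'WR', 'TE', 'K', 'D/ST']
--
-- def extract_team_and_pos(team_pos):
--     team, position = None, None
--     for pos in POSITIONS:
--         if team_pos.endswith(pos):
--             team, _ = team_pos.rsplit(pos, 1)
--             position = pos
--             break
--     team = team.strip()
--     return team, position
-- ===== SOURCE B (Python) =====
-- import re
--
-- PATTERN = re.compile(r'(.*)(QB|RB|WR|TE|K|D/ST)\Z', re.DOTALL)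
--
-- def extract_team_and_pos(team_pos):
--     m = PATTERN.match(team_pos)
--     team = m.group(1).strip()
--     position = m.group(2)
--     return team, position
-- ===== Notes on version B (the rewrite author's own statement) =====
-- stated objective: idiomatic
-- what changed: Replaces A's explicit endswith/rsplit loop over the position list with a single anchored regex match r'(.*)(QB|RB|WR|TE|K|D/ST)\Z' whose greedy group 1 yields the team prefix.
-- outside the precondition, e.g. on extract_team_and_pos('Tom Brady'): A raises AttributeError, B raises AttributeError
import Mathlib
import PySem

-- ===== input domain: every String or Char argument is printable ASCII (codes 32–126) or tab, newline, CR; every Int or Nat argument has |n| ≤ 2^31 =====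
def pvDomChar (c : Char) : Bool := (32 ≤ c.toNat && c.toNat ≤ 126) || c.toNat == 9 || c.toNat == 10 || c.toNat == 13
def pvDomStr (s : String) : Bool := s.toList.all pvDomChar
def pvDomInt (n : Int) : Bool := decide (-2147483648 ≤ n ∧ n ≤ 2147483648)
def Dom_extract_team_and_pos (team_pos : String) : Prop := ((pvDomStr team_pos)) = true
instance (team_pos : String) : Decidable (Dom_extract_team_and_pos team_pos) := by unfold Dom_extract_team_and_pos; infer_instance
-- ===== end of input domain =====

-- B replaces A's explicit endswith/rsplit scan over the position list by one anchored
-- regex match (more idiomatic); return values proved equal on inputs ending in a position.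

-- ===== PORT A =====
-- team_pos.rsplit(pos, 1)[0]: the prefix before the LAST occurrence of pos; scan the
-- split point j downward from the highest possible position (exact whenever an
-- occurrence exists, the only situation in which A reaches the rsplit).
def pvRsplit1 (l p : List Char) : Nat → List Char
  | 0 => if p.isPrefixOf (l.drop 0) then l.take 0 else l
  | j + 1 => if p.isPrefixOf (l.drop (j + 1)) then l.take (j + 1) else pvRsplit1 l p j

-- A's for-loop with break; [] = no position matched: Python's team.strip() on None then
-- raises AttributeError (excluded by Pre_), the port returns ("", "").
def pvALoop (s : String) : List String → String × String
  | [] => ("", "")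
  | pos :: rest =>
    if PySem.Str.endswith s pos then
      (PySem.Str.strip (String.ofList
          (pvRsplit1 s.toList pos.toList (s.toList.length - pos.toList.length))), pos)
    else pvALoop s rest

def extract_team_and_pos (team_pos : String) : String × String :=
  pvALoop team_pos ["QB", "RB", "WR", "TE", "K", "D/ST"]

-- ===== PORT B =====
-- Hand port of re.match of the anchored pattern r'(.*)(QB|RB|WR|TE|K|D/ST)\Z' (DOTALL):
-- the greedy '.*' makes the engine try split points i from len(s) downward and, at each
-- split point, the alternatives left to right; exact for this anchored pattern.
def pvTryAt (l : List Char) (i : Nat) : Option (String × String) :=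
  if l.drop i = ['Q','B'] then some (PySem.Str.strip (String.ofList (l.take i)), "QB")
  else if l.drop i = ['R','B'] then some (PySem.Str.strip (String.ofList (l.take i)), "RB")
  else if l.drop i = ['W','R'] then some (PySem.Str.strip (String.ofList (l.take i)), "WR")
  else if l.drop i = ['T','E'] then some (PySem.Str.strip (String.ofList (l.take i)), "TE")
  else if l.drop i = ['K'] then some (PySem.Str.strip (String.ofList (l.take i)), "K")
  else if l.drop i = ['D','/','S','T'] then some (PySem.Str.strip (String.ofList (l.take i)), "D/ST")
  else none

def pvScan (l : List Char) : Nat → Option (String × String)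
  | 0 => pvTryAt l 0
  | i + 1 =>
    match pvTryAt l (i + 1) with
    | some r => some r
    | none => pvScan l i

-- no regex match: m.group(1).strip() raises AttributeError (excluded by Pre_), port returns ("", "")
def extract_team_and_pos_alt (team_pos : String) : String × String :=
  (pvScan team_pos.toList team_pos.toList.length).getD ("", "")

-- ===== PRECONDITION & SPEC =====
-- Pre_ holds exactly when team_pos ends with one of the six positions; on all other
-- inputs both the Python A (None.strip()) and the Python B (None.group) raise AttributeError.
def Pre_extract_team_and_pos (team_pos : String) : Prop :=
  PySem.Str.endswith team_pos "QB" = true ∨ PySem.Str.endswith team_pos "RB" = true ∨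
  PySem.Str.endswith team_pos "WR" = true ∨ PySem.Str.endswith team_pos "TE" = true ∨
  PySem.Str.endswith team_pos "K" = true ∨ PySem.Str.endswith team_pos "D/ST" = true
instance (team_pos : String) : Decidable (Pre_extract_team_and_pos team_pos) := by
  unfold Pre_extract_team_and_pos; infer_instance

def pvWitness_extract_team_and_pos : String := "Tom Brady QB"

def Spec_extract_team_and_pos (team_pos : String) (out : String × String) : Prop := out = extract_team_and_pos_alt team_pos
instance (team_pos : String) (out : String × String) : Decidable (Spec_extract_team_and_pos team_pos out) := by unfold Spec_extract_team_and_pos; infer_instance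

-- ===== CLAIM (what is proved, stated in full; the proofs are below) =====
def Claim_equal_extract_team_and_pos : Prop := ∀ (team_pos : String), Dom_extract_team_and_pos team_pos → Pre_extract_team_and_pos team_pos → Spec_extract_team_and_pos team_pos (extract_team_and_pos team_pos)

-- ===== LEMMAS AND PROOFS =====

-- endswith on an explicit suffix
theorem pv_es_true (t p : List Char) (ps : String) (hp : ps.toList = p) :
    PySem.Str.endswith (String.ofList (t ++ p)) ps = true := by
  simp [hp, PySem.Chars.endswith_iff]

theorem pv_es_false (t q : List Char) (ps : String) (h : ¬ (ps.toList <:+ t ++ q)) :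
    PySem.Str.endswith (String.ofList (t ++ q)) ps = false := by
  simp only [PySem.Str.endswith_eq, String.toList_ofList, ← Bool.not_eq_true,
    PySem.Chars.endswith_iff]
  exact h

-- a nonempty suffix fixes the last element
theorem pv_suffix_getLast? {p l : List Char} (h : p <:+ l) (hp : p ≠ []) :
    l.getLast? = p.getLast? := by
  obtain ⟨u, hu⟩ := h
  rw [← hu, List.getLast?_append_of_ne_nil _ hp]

-- equal-length suffixes of the same list coincide
theorem pv_suffix_of_append {p q t : List Char} (h : p <:+ t ++ q)
    (hl : p.length = q.length) : p = q := by
  obtain ⟨u, hu⟩ := h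
  exact List.append_inj_right' hu (by omega)

-- the rsplit scan succeeds at its first (topmost) split point when pos is the suffix
theorem pv_rsplit1_top (t p : List Char) : pvRsplit1 (t ++ p) p t.length = t := by
  cases t with
  | nil => simp [pvRsplit1]
  | cons c t' => simp [pvRsplit1]

-- one failing / one succeeding step of the regex engine's split-point scan
theorem pv_scan_step (l : List Char) (i : Nat) (h : pvTryAt l (i + 1) = none) :
    pvScan l (i + 1) = pvScan l i := by
  simp [pvScan, h]

theorem pv_scan_hit (l : List Char) (i : Nat) (r : String × String)
    (h : pvTryAt l i = some r) : pvScan l i = some r := by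
  cases i with
  | zero => simpa [pvScan] using h
  | succ j => simp [pvScan, h]

-- the six per-case equalities (the input written as team ++ position)
theorem pv_case_QB (t : List Char) :
    extract_team_and_pos (String.ofList (t ++ ['Q','B'])) =
    extract_team_and_pos_alt (String.ofList (t ++ ['Q','B'])) := by
  have e1 := pv_es_true t ['Q','B'] "QB" rfl
  simp only [extract_team_and_pos, extract_team_and_pos_alt, pvALoop, e1,
    if_true, String.toList_ofList]
  have hlen : (t ++ ['Q','B']).length = t.length + 2 := by simp
  have hq : ("QB".toList : List Char) = ['Q','B'] := rfl
  rw [hlen, hq]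
  have h2 : t.length + 2 - (['Q','B'] : List Char).length = t.length := by simp
  rw [h2, pv_rsplit1_top]
  have dn : (t ++ ['Q','B']).drop (t.length + 1 + 1) = [] := by
    apply List.drop_eq_nil_of_le; simp
  have d1 : (t ++ ['Q','B']).drop (t.length + 1) = ['B'] := by
    have e : t.length + 1 = t.length + 1 := rfl
    rw [e]; simp [List.drop_append]
  have d0 : (t ++ ['Q','B']).drop t.length = ['Q','B'] := by simp
  have t0 : (t ++ ['Q','B']).take t.length = t := by simp
  have b2 : pvTryAt (t ++ ['Q','B']) (t.length + 1 + 1) = none := by simp [pvTryAt, dn]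
  have b1 : pvTryAt (t ++ ['Q','B']) (t.length + 1) = none := by simp [pvTryAt, d1]
  have b0 : pvTryAt (t ++ ['Q','B']) t.length =
      some (PySem.Str.strip (String.ofList t), "QB") := by simp [pvTryAt, d0, t0]
  rw [show t.length + 2 = t.length + 1 + 1 from rfl, pv_scan_step _ _ b2, pv_scan_step _ _ b1, pv_scan_hit _ _ _ b0]
  rfl

theorem pv_case_RB (t : List Char) :
    extract_team_and_pos (String.ofList (t ++ ['R','B'])) =
    extract_team_and_pos_alt (String.ofList (t ++ ['R','B'])) := by
  have eQB : PySem.Str.endswith (String.ofList (t ++ ['R','B'])) "QB" = false := by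
    refine pv_es_false t _ _ (fun h => ?_)
    have := pv_suffix_of_append h (by simp); simp at this
  have e1 := pv_es_true t ['R','B'] "RB" rfl
  simp only [extract_team_and_pos, extract_team_and_pos_alt, pvALoop, eQB, e1,
    if_true, Bool.false_eq_true, if_false, String.toList_ofList]
  have hlen : (t ++ ['R','B']).length = t.length + 2 := by simp
  have hq : ("RB".toList : List Char) = ['R','B'] := rfl
  rw [hlen, hq]
  have h2 : t.length + 2 - (['R','B'] : List Char).length = t.length := by simp
  rw [h2, pv_rsplit1_top]
  have dn : (t ++ ['R','B']).drop (t.length + 1 + 1) = [] := by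
    apply List.drop_eq_nil_of_le; simp
  have d1 : (t ++ ['R','B']).drop (t.length + 1) = ['B'] := by
    have e : t.length + 1 = t.length + 1 := rfl
    rw [e]; simp [List.drop_append]
  have d0 : (t ++ ['R','B']).drop t.length = ['R','B'] := by simp
  have t0 : (t ++ ['R','B']).take t.length = t := by simp
  have b2 : pvTryAt (t ++ ['R','B']) (t.length + 1 + 1) = none := by simp [pvTryAt, dn]
  have b1 : pvTryAt (t ++ ['R','B']) (t.length + 1) = none := by simp [pvTryAt, d1]
  have b0 : pvTryAt (t ++ ['R','B']) t.length =
      some (PySem.Str.strip (String.ofList t), "RB") := by simp [pvTryAt, d0, t0]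
  rw [show t.length + 2 = t.length + 1 + 1 from rfl, pv_scan_step _ _ b2, pv_scan_step _ _ b1, pv_scan_hit _ _ _ b0]
  rfl

theorem pv_case_WR (t : List Char) :
    extract_team_and_pos (String.ofList (t ++ ['W','R'])) =
    extract_team_and_pos_alt (String.ofList (t ++ ['W','R'])) := by
  have eQB : PySem.Str.endswith (String.ofList (t ++ ['W','R'])) "QB" = false := by
    refine pv_es_false t _ _ (fun h => ?_)
    have := pv_suffix_getLast? h (by simp); simp at this
  have eRB : PySem.Str.endswith (String.ofList (t ++ ['W','R'])) "RB" = false := by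
    refine pv_es_false t _ _ (fun h => ?_)
    have := pv_suffix_getLast? h (by simp); simp at this
  have e1 := pv_es_true t ['W','R'] "WR" rfl
  simp only [extract_team_and_pos, extract_team_and_pos_alt, pvALoop, eQB, eRB, e1,
    if_true, Bool.false_eq_true, if_false, String.toList_ofList]
  have hlen : (t ++ ['W','R']).length = t.length + 2 := by simp
  have hq : ("WR".toList : List Char) = ['W','R'] := rfl
  rw [hlen, hq]
  have h2 : t.length + 2 - (['W','R'] : List Char).length = t.length := by simp
  rw [h2, pv_rsplit1_top]
  have dn : (t ++ ['W','R']).drop (t.length + 1 + 1) = [] := by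
    apply List.drop_eq_nil_of_le; simp
  have d1 : (t ++ ['W','R']).drop (t.length + 1) = ['R'] := by
    have e : t.length + 1 = t.length + 1 := rfl
    rw [e]; simp [List.drop_append]
  have d0 : (t ++ ['W','R']).drop t.length = ['W','R'] := by simp
  have t0 : (t ++ ['W','R']).take t.length = t := by simp
  have b2 : pvTryAt (t ++ ['W','R']) (t.length + 1 + 1) = none := by simp [pvTryAt, dn]
  have b1 : pvTryAt (t ++ ['W','R']) (t.length + 1) = none := by simp [pvTryAt, d1]
  have b0 : pvTryAt (t ++ ['W','R']) t.length =
      some (PySem.Str.strip (String.ofList t), "WR") := by simp [pvTryAt, d0, t0]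
  rw [show t.length + 2 = t.length + 1 + 1 from rfl, pv_scan_step _ _ b2, pv_scan_step _ _ b1, pv_scan_hit _ _ _ b0]
  rfl

theorem pv_case_TE (t : List Char) :
    extract_team_and_pos (String.ofList (t ++ ['T','E'])) =
    extract_team_and_pos_alt (String.ofList (t ++ ['T','E'])) := by
  have eQB : PySem.Str.endswith (String.ofList (t ++ ['T','E'])) "QB" = false := by
    refine pv_es_false t _ _ (fun h => ?_)
    have := pv_suffix_getLast? h (by simp); simp at this
  have eRB : PySem.Str.endswith (String.ofList (t ++ ['T','E'])) "RB" = false := by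
    refine pv_es_false t _ _ (fun h => ?_)
    have := pv_suffix_getLast? h (by simp); simp at this
  have eWR : PySem.Str.endswith (String.ofList (t ++ ['T','E'])) "WR" = false := by
    refine pv_es_false t _ _ (fun h => ?_)
    have := pv_suffix_getLast? h (by simp); simp at this
  have e1 := pv_es_true t ['T','E'] "TE" rfl
  simp only [extract_team_and_pos, extract_team_and_pos_alt, pvALoop, eQB, eRB, eWR, e1,
    if_true, Bool.false_eq_true, if_false, String.toList_ofList]
  have hlen : (t ++ ['T','E']).length = t.length + 2 := by simp
  have hq : ("TE".toList : List Char) = ['T','E'] := rfl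
  rw [hlen, hq]
  have h2 : t.length + 2 - (['T','E'] : List Char).length = t.length := by simp
  rw [h2, pv_rsplit1_top]
  have dn : (t ++ ['T','E']).drop (t.length + 1 + 1) = [] := by
    apply List.drop_eq_nil_of_le; simp
  have d1 : (t ++ ['T','E']).drop (t.length + 1) = ['E'] := by
    have e : t.length + 1 = t.length + 1 := rfl
    rw [e]; simp [List.drop_append]
  have d0 : (t ++ ['T','E']).drop t.length = ['T','E'] := by simp
  have t0 : (t ++ ['T','E']).take t.length = t := by simp
  have b2 : pvTryAt (t ++ ['T','E']) (t.length + 1 + 1) = none := by simp [pvTryAt, dn]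
  have b1 : pvTryAt (t ++ ['T','E']) (t.length + 1) = none := by simp [pvTryAt, d1]
  have b0 : pvTryAt (t ++ ['T','E']) t.length =
      some (PySem.Str.strip (String.ofList t), "TE") := by simp [pvTryAt, d0, t0]
  rw [show t.length + 2 = t.length + 1 + 1 from rfl, pv_scan_step _ _ b2, pv_scan_step _ _ b1, pv_scan_hit _ _ _ b0]
  rfl

theorem pv_case_K (t : List Char) :
    extract_team_and_pos (String.ofList (t ++ ['K'])) =
    extract_team_and_pos_alt (String.ofList (t ++ ['K'])) := by
  have eQB : PySem.Str.endswith (String.ofList (t ++ ['K'])) "QB" = false := by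
    refine pv_es_false t _ _ (fun h => ?_)
    have := pv_suffix_getLast? h (by simp); simp at this
  have eRB : PySem.Str.endswith (String.ofList (t ++ ['K'])) "RB" = false := by
    refine pv_es_false t _ _ (fun h => ?_)
    have := pv_suffix_getLast? h (by simp); simp at this
  have eWR : PySem.Str.endswith (String.ofList (t ++ ['K'])) "WR" = false := by
    refine pv_es_false t _ _ (fun h => ?_)
    have := pv_suffix_getLast? h (by simp); simp at this
  have eTE : PySem.Str.endswith (String.ofList (t ++ ['K'])) "TE" = false := by
    refine pv_es_false t _ _ (fun h => ?_)
    have := pv_suffix_getLast? h (by simp); simp at this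
  have e1 := pv_es_true t ['K'] "K" rfl
  simp only [extract_team_and_pos, extract_team_and_pos_alt, pvALoop, eQB, eRB, eWR, eTE, e1,
    if_true, Bool.false_eq_true, if_false, String.toList_ofList]
  have hlen : (t ++ ['K']).length = t.length + 1 := by simp
  have hq : ("K".toList : List Char) = ['K'] := rfl
  rw [hlen, hq]
  have h2 : t.length + 1 - (['K'] : List Char).length = t.length := by simp
  rw [h2, pv_rsplit1_top]
  have dn : (t ++ ['K']).drop (t.length + 1) = [] := by
    apply List.drop_eq_nil_of_le; simp
  have d0 : (t ++ ['K']).drop t.length = ['K'] := by simp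
  have t0 : (t ++ ['K']).take t.length = t := by simp
  have b1 : pvTryAt (t ++ ['K']) (t.length + 1) = none := by simp [pvTryAt, dn]
  have b0 : pvTryAt (t ++ ['K']) t.length =
      some (PySem.Str.strip (String.ofList t), "K") := by simp [pvTryAt, d0, t0]
  rw [pv_scan_step _ _ b1, pv_scan_hit _ _ _ b0]
  rfl

theorem pv_case_DST (t : List Char) :
    extract_team_and_pos (String.ofList (t ++ ['D','/','S','T'])) =
    extract_team_and_pos_alt (String.ofList (t ++ ['D','/','S','T'])) := by
  have eQB : PySem.Str.endswith (String.ofList (t ++ ['D','/','S','T'])) "QB" = false := by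
    refine pv_es_false t _ _ (fun h => ?_)
    have := pv_suffix_getLast? h (by simp); simp at this
  have eRB : PySem.Str.endswith (String.ofList (t ++ ['D','/','S','T'])) "RB" = false := by
    refine pv_es_false t _ _ (fun h => ?_)
    have := pv_suffix_getLast? h (by simp); simp at this
  have eWR : PySem.Str.endswith (String.ofList (t ++ ['D','/','S','T'])) "WR" = false := by
    refine pv_es_false t _ _ (fun h => ?_)
    have := pv_suffix_getLast? h (by simp); simp at this
  have eTE : PySem.Str.endswith (String.ofList (t ++ ['D','/','S','T'])) "TE" = false := by
    refine pv_es_false t _ _ (fun h => ?_)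
    have := pv_suffix_getLast? h (by simp); simp at this
  have eK : PySem.Str.endswith (String.ofList (t ++ ['D','/','S','T'])) "K" = false := by
    refine pv_es_false t _ _ (fun h => ?_)
    have := pv_suffix_getLast? h (by simp); simp at this
  have e1 := pv_es_true t ['D','/','S','T'] "D/ST" rfl
  simp only [extract_team_and_pos, extract_team_and_pos_alt, pvALoop, eQB, eRB, eWR, eTE, eK, e1,
    if_true, Bool.false_eq_true, if_false, String.toList_ofList]
  have hlen : (t ++ ['D','/','S','T']).length = t.length + 4 := by simp
  have hq : ("D/ST".toList : List Char) = ['D','/','S','T'] := rfl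
  rw [hlen, hq]
  have h2 : t.length + 4 - (['D','/','S','T'] : List Char).length = t.length := by simp
  rw [h2, pv_rsplit1_top]
  have dn : (t ++ ['D','/','S','T']).drop (t.length + 3 + 1) = [] := by
    apply List.drop_eq_nil_of_le; simp
  have d1 : (t ++ ['D','/','S','T']).drop (t.length + 1) = ['/','S','T'] := by
    have e : t.length + 1 = t.length + 1 := rfl
    rw [e]; simp [List.drop_append]
  have d2 : (t ++ ['D','/','S','T']).drop (t.length + 1 + 1) = ['S','T'] := by
    have e : t.length + 1 + 1 = t.length + 2 := rfl
    rw [e]; simp [List.drop_append]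
  have d3 : (t ++ ['D','/','S','T']).drop (t.length + 2 + 1) = ['T'] := by
    have e : t.length + 2 + 1 = t.length + 3 := rfl
    rw [e]; simp [List.drop_append]
  have d0 : (t ++ ['D','/','S','T']).drop t.length = ['D','/','S','T'] := by simp
  have t0 : (t ++ ['D','/','S','T']).take t.length = t := by simp
  have b4 : pvTryAt (t ++ ['D','/','S','T']) (t.length + 3 + 1) = none := by simp [pvTryAt, dn]
  have b1 : pvTryAt (t ++ ['D','/','S','T']) (t.length + 1) = none := by simp [pvTryAt, d1]
  have b2 : pvTryAt (t ++ ['D','/','S','T']) (t.length + 1 + 1) = none := by simp [pvTryAt, d2]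
  have b3 : pvTryAt (t ++ ['D','/','S','T']) (t.length + 2 + 1) = none := by simp [pvTryAt, d3]
  have b0 : pvTryAt (t ++ ['D','/','S','T']) t.length =
      some (PySem.Str.strip (String.ofList t), "D/ST") := by simp [pvTryAt, d0, t0]
  rw [show t.length + 4 = t.length + 3 + 1 from rfl, pv_scan_step _ _ b4, show t.length + 3 = t.length + 2 + 1 from rfl, pv_scan_step _ _ b3, show t.length + 2 = t.length + 1 + 1 from rfl, pv_scan_step _ _ b2, pv_scan_step _ _ b1, pv_scan_hit _ _ _ b0]
  rfl

-- ===== VERDICT (by name: the statement is the Claim_ definition above) =====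
theorem extract_team_and_pos_spec : Claim_equal_extract_team_and_pos := by
  intro s _ hpre
  unfold Spec_extract_team_and_pos
  have hs : s = String.ofList s.toList := by simp
  rcases hpre with h | h | h | h | h | h <;>
    rw [PySem.Str.endswith_eq, PySem.Chars.endswith_iff] at h <;>
    obtain ⟨t, ht⟩ := h
  · rw [hs, ← ht, show ("QB".toList : List Char) = ['Q','B'] from rfl]
    exact (pv_case_QB t)
  · rw [hs, ← ht, show ("RB".toList : List Char) = ['R','B'] from rfl]
    exact (pv_case_RB t)
  · rw [hs, ← ht, show ("WR".toList : List Char) = ['W','R'] from rfl]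
    exact (pv_case_WR t)
  · rw [hs, ← ht, show ("TE".toList : List Char) = ['T','E'] from rfl]
    exact (pv_case_TE t)
  · rw [hs, ← ht, show ("K".toList : List Char) = ['K'] from rfl]
    exact (pv_case_K t)
  · rw [hs, ← ht, show ("D/ST".toList : List Char) = ['D','/','S','T'] from rfl]
    exact (pv_case_DST t)
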